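-- pv_equiv track=rewrite | github.com/SantiagoAvila1253/Grupo13- | funcionalidades/filtros.py | filtrar_por_legajo_rec
-- ===== SOURCE A (Python) =====
-- def filtrar_por_legajo_rec(matriz, legajo, i=0, acumulado=None):
--     ### Filtra recursivamente por legajo exacto
--     if acumulado is None:
--         acumulado = []
--     if i == len(matriz):  # caso base
--         return acumulado
--
--     fila = matriz[i]
--     if fila and len(fila) >= 2 and fila[1].isdigit() and int(fila[1]) == legajo:
--         acumulado.append(fila)
--
--     return filtrar_por_legajo_rec(  # caso recursivo + reducción del dominio
--         matriz, legajo, i + 1, acumulado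
--     )
-- ===== SOURCE B (Python) =====
-- def filtrar_por_legajo_rec(matriz, legajo, i=0, acumulado=None):
--     ### Filtra por legajo exacto con un unico bucle iterativo
--     if acumulado is None:
--         acumulado = []
--     for j in range(i, len(matriz)):
--         fila = matriz[j]
--         if fila and len(fila) >= 2 and fila[1].isdigit() and int(fila[1]) == legajo:
--             acumulado.append(fila)
--     return acumulado
-- ===== Notes on version B (the rewrite author's own statement) =====
-- stated objective: simpler
-- what changed: Replaced the tail recursion over an index parameter with a single iterative for-loop over range(i, len(matriz)) appending matches; no base case and no self-call.
import Mathlib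
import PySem

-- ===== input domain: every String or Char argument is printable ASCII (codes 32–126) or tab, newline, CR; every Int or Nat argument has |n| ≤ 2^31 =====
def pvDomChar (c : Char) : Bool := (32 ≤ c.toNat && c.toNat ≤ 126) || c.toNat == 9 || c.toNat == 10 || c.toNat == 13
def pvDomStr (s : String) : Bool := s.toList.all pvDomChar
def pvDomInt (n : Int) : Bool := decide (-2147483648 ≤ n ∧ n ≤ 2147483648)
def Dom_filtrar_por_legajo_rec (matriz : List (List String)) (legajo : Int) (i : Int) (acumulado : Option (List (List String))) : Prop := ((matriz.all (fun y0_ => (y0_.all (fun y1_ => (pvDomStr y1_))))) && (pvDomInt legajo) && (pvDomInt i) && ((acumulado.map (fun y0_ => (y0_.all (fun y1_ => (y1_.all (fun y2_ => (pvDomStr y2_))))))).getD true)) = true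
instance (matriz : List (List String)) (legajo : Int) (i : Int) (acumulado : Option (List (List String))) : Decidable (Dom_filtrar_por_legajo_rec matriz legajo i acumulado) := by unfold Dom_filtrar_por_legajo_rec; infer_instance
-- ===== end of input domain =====

-- B replaces A's tail recursion over an index parameter by a single iterative loop over
-- range(i, len(matriz)); same appends to the same (mutated) acumulado list, same return value.

-- ===== PORT A =====
-- the shared row test: `fila and len(fila) >= 2 and fila[1].isdigit() and int(fila[1]) == legajo`
-- (identical line in both Pythons). After isdigit succeeds on a printable-ASCII string,
-- int(fila[1]) succeeds, so `(ofStr? …).getD 0` is exact there.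
def pvFilaMatch (fila : List String) (legajo : Int) : Bool :=
  !fila.isEmpty && decide (2 ≤ fila.length) &&
    PySem.Str.strIsdigit (PySem.List.pyGetD fila 1 "") &&
    ((PySem.Int.ofStr? (PySem.List.pyGetD fila 1 "")).getD 0 == legajo)

-- used by pvGoA's decreasing_by
theorem pvGet_lt {α : Type} (xs : List α) (i : Int) (x : α)
    (h : PySem.List.pyGet? xs i = some x) : i < (xs.length : Int) := by
  simp only [PySem.List.pyGet?, PySem.List.pyIdx?] at h
  split_ifs at h <;> simp_all <;> omega

-- A's recursion: base case at i == len(matriz), else look at matriz[i] (none = IndexError,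
-- where Python raises; outside Pre_), append on match, recurse on i+1.
def pvGoA (matriz : List (List String)) (legajo : Int) (i : Int)
    (acc : List (List String)) : List (List String) :=
  if i = (matriz.length : Int) then acc
  else
    match h : PySem.List.pyGet? matriz i with
    | none => acc   -- Python raises IndexError here (excluded by Pre_)
    | some fila =>
        pvGoA matriz legajo (i + 1)
          (if pvFilaMatch fila legajo then acc ++ [fila] else acc)
  termination_by ((matriz.length : Int) - i).toNat
  decreasing_by
    have := pvGet_lt matriz i fila h
    omega

def filtrar_por_legajo_rec (matriz : List (List String)) (legajo : Int) (i : Int)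
    (acumulado : Option (List (List String))) : List (List String) :=
  pvGoA matriz legajo i (acumulado.getD [])

-- ===== PORT B =====
-- B: `for j in range(i, len(matriz)):` appending matching rows to acumulado.
def filtrar_por_legajo_rec_alt (matriz : List (List String)) (legajo : Int) (i : Int)
    (acumulado : Option (List (List String))) : List (List String) :=
  (PySem.List.pyRange i (matriz.length : Int)).foldl
    (fun acc j =>
      match PySem.List.pyGet? matriz j with
      | none => acc   -- Python raises IndexError here (excluded by Pre_)
      | some fila => if pvFilaMatch fila legajo then acc ++ [fila] else acc)
    (acumulado.getD [])

-- ===== PRECONDITION & SPEC =====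
-- Pre_ excludes exactly the inputs where Python A raises IndexError on matriz[i]:
-- a start index i outside [-len(matriz), len(matriz)].
def Pre_filtrar_por_legajo_rec (matriz : List (List String)) (legajo : Int) (i : Int) (acumulado : Option (List (List String))) : Prop :=
  -(matriz.length : Int) ≤ i ∧ i ≤ (matriz.length : Int)
instance (matriz : List (List String)) (legajo : Int) (i : Int) (acumulado : Option (List (List String))) : Decidable (Pre_filtrar_por_legajo_rec matriz legajo i acumulado) := by unfold Pre_filtrar_por_legajo_rec; infer_instance

def pvWitness_filtrar_por_legajo_rec : List (List String) × Int × Int × Option (List (List String)) :=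
  ([["Ana", "5"], ["Luis", "6"], ["solo"]], 5, 0, none)

def Spec_filtrar_por_legajo_rec (matriz : List (List String)) (legajo : Int) (i : Int) (acumulado : Option (List (List String))) (out : List (List String)) : Prop := out = filtrar_por_legajo_rec_alt matriz legajo i acumulado
instance (matriz : List (List String)) (legajo : Int) (i : Int) (acumulado : Option (List (List String))) (out : List (List String)) : Decidable (Spec_filtrar_por_legajo_rec matriz legajo i acumulado out) := by unfold Spec_filtrar_por_legajo_rec; infer_instance

-- ===== CLAIM (what is proved, stated in full; the proofs are below) =====
def Claim_equal_filtrar_por_legajo_rec : Prop := ∀ (matriz : List (List String)) (legajo : Int) (i : Int) (acumulado : Option (List (List String))), Dom_filtrar_por_legajo_rec matriz legajo i acumulado → Pre_filtrar_por_legajo_rec matriz legajo i acumulado → Spec_filtrar_por_legajo_rec matriz legajo i acumulado (filtrar_por_legajo_rec matriz legajo i acumulado)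

-- ===== LEMMAS AND PROOFS =====

theorem pvGet_isSome {α : Type} (xs : List α) (i : Int)
    (h1 : -(xs.length : Int) ≤ i) (h2 : i < (xs.length : Int)) :
    ∃ x, PySem.List.pyGet? xs i = some x := by
  simp only [PySem.List.pyGet?, PySem.List.pyIdx?]
  by_cases h0 : 0 ≤ i
  · rw [if_pos h0, if_pos h2]
    have hk : i.toNat < xs.length := by omega
    exact ⟨xs[i.toNat], by simp [List.getElem?_eq_getElem hk]⟩
  · rw [if_neg h0, if_pos h1]
    have hk : xs.length - (-i).toNat < xs.length := by omega
    exact ⟨xs[xs.length - (-i).toNat], by simp [List.getElem?_eq_getElem hk]⟩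

theorem pvGo_eq_foldl (matriz : List (List String)) (legajo : Int) :
    ∀ (n : Nat) (i : Int) (acc : List (List String)),
      -(matriz.length : Int) ≤ i → i ≤ (matriz.length : Int) →
      ((matriz.length : Int) - i).toNat = n →
      pvGoA matriz legajo i acc =
        (PySem.List.pyRange i (matriz.length : Int)).foldl
          (fun acc j =>
            match PySem.List.pyGet? matriz j with
            | none => acc
            | some fila => if pvFilaMatch fila legajo then acc ++ [fila] else acc)
          acc := by
  intro n
  induction n with
  | zero =>
      intro i acc h1 h2 hn
      have hi : i = (matriz.length : Int) := by omega
      rw [hi, pvGoA, PySem.List.pyRange_one_eq_nil le_rfl]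
      simp
  | succ m ih =>
      intro i acc h1 h2 hn
      have hlt : i < (matriz.length : Int) := by omega
      obtain ⟨fila, hf⟩ := pvGet_isSome matriz i h1 hlt
      have hne : ¬ i = (matriz.length : Int) := by omega
      rw [pvGoA, if_neg hne, PySem.List.pyRange_one_cons hlt]
      simp only [List.foldl_cons]
      split
      · simp_all
      · rename_i fila' heq
        simp only [heq]
        exact ih (i + 1) _ (by omega) (by omega) (by omega)

-- ===== VERDICT (by name: the statement is the Claim_ definition above) =====
theorem filtrar_por_legajo_rec_spec : Claim_equal_filtrar_por_legajo_rec := by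
  intro matriz legajo i acumulado _ hpre
  unfold Spec_filtrar_por_legajo_rec filtrar_por_legajo_rec filtrar_por_legajo_rec_alt
  exact pvGo_eq_foldl matriz legajo _ i _ hpre.1 hpre.2 rfl
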